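-- pv_equiv track=rewrite | github.com/nkllon/kiro-ai-development-hackathon | scripts/launch_headless_execution.py | _resolve_dependencies
-- ===== SOURCE A (Python) =====
-- from typing import Dict, List, Any, Optional
--
-- def _resolve_dependencies(spec_name: str, spec_dag: Dict[str, List[str]]) -> List[str]:
--     """Resolve dependencies for a spec based on DAG layer structure"""
--     dependencies = []
--
--     # Find which layer this spec is in
--     current_layer = None
--     for layer_name, layer_specs in spec_dag.items():
--         if spec_name in layer_specs:
--             current_layer = layer_name
--             break
--
--     if not current_layer:
--         return dependencies
--
--     # Add dependencies based on layer hierarchy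
--     layer_order = list(spec_dag.keys())
--     current_index = layer_order.index(current_layer)
--
--     # Depend on all specs in previous layers
--     for i in range(current_index):
--         dependencies.extend(spec_dag[layer_order[i]])
--
--     return dependencies
-- ===== SOURCE B (Python) =====
-- def _resolve_dependencies(spec_name: str, spec_dag: dict) -> list:
--     """Collect specs of all layers preceding spec_name's layer, in one pass."""
--     acc = []
--     for layer_name, layer_specs in spec_dag.items():
--         if spec_name in layer_specs:
--             return acc
--         acc.extend(layer_specs)
--     return []
-- ===== Notes on version B (the rewrite author's own statement) =====
-- stated objective: simpler
-- what changed: A's two passes (find the spec's layer by scanning, then re-index the key list and re-look-up every preceding layer in the dict) are fused into one early-returning loop over spec_dag.items() that accumulates the specs seen so far and returns the accumulator on the first hit, [] if the spec is never found.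
-- intended difference: On inputs where the first layer containing spec_name is named "" and earlier layers hold at least one spec, A returns [] because its `if not current_layer` test treats the falsy layer name "" as not-found, while B returns those earlier layers' specs, the intended dependencies of the layer hierarchy. — e.g. on _resolve_dependencies("x", [("a", ["p"]), ("", ["x"])]): A returns [], B returns ["p"]
import Mathlib
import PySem

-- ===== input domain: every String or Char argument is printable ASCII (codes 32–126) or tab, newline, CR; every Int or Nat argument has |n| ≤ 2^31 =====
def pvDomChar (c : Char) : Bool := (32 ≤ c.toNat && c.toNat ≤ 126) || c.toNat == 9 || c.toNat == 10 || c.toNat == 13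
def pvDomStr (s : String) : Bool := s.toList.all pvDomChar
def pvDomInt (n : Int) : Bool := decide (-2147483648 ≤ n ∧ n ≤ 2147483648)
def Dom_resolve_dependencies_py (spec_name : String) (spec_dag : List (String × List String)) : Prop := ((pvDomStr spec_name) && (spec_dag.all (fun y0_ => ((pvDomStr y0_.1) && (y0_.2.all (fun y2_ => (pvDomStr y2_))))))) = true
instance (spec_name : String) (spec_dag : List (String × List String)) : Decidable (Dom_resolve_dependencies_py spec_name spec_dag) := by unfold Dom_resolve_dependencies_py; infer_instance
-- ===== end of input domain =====

-- B fuses A's two passes (find the layer, then re-index and re-look-up all previous layers)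
-- into one early-returning accumulator loop; on the corner where the found layer is named ""
-- A's falsy-string test drops the result, see D_ below.

-- ===== PORT A =====
-- first loop of A: find the name of the layer containing spec_name (break on first hit)
def pvFindLayer (spec_name : String) : List (String × List String) → Option String
  | [] => none
  | (layer_name, layer_specs) :: rest =>
      if spec_name ∈ layer_specs then some layer_name else pvFindLayer spec_name rest

def resolve_dependencies_py (spec_name : String) (spec_dag : List (String × List String)) : List String :=
  let dependencies : List String := []
  match pvFindLayer spec_name spec_dag with
  | none => dependencies
  | some current_layer =>
      -- Python: `if not current_layer: return dependencies` — also true for the falsy name ""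
      if current_layer = "" then dependencies
      else
        let layer_order := spec_dag.map Prod.fst
        -- `.index` cannot fail here (current_layer comes from the keys); getD 0 is a totality guard
        let current_index : Int := ((PySem.List.index? layer_order current_layer).getD 0 : Nat)
        (PySem.List.pyRange 0 current_index 1).foldl
          (fun deps i =>
            deps ++ (PySem.Dict.mk spec_dag).getD (PySem.List.pyGetD layer_order i "") [])
          dependencies

-- ===== PORT B =====
def pvAltLoop (spec_name : String) (acc : List String) : List (String × List String) → List String
  | [] => []
  | (_, layer_specs) :: rest =>
      if spec_name ∈ layer_specs then acc else pvAltLoop spec_name (acc ++ layer_specs) rest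

def resolve_dependencies_py_alt (spec_name : String) (spec_dag : List (String × List String)) : List String :=
  pvAltLoop spec_name [] spec_dag

-- ===== PRECONDITION & SPEC =====
-- Pre_ excludes association lists with a repeated layer name, which cannot arise from a Python
-- dict (dict keys are unique); on them A's lookup-by-name would not represent any Python run.
def Pre_resolve_dependencies_py (spec_name : String) (spec_dag : List (String × List String)) : Prop :=
  (spec_dag.map Prod.fst).Nodup
instance (spec_name : String) (spec_dag : List (String × List String)) : Decidable (Pre_resolve_dependencies_py spec_name spec_dag) := by unfold Pre_resolve_dependencies_py; infer_instance

def pvWitness_resolve_dependencies_py : String × (List (String × List String)) :=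
  ("x", [("a", ["x"])])

-- On inputs where the first layer containing spec_name is named "" and earlier layers hold at
-- least one spec, A returns [] (its `if not current_layer` test treats the falsy name "" as
-- not-found) while B returns those earlier layers' specs, the intended dependencies.
def D_resolve_dependencies_py (spec_name : String) (spec_dag : List (String × List String)) : Prop :=
  ∃ k < spec_dag.length,
    (spec_dag.getD k ("", [])).1 = "" ∧
    spec_name ∈ (spec_dag.getD k ("", [])).2 ∧
    (∀ j < k, spec_name ∉ (spec_dag.getD j ("", [])).2) ∧
    (spec_dag.take k).flatMap Prod.snd ≠ []
instance (spec_name : String) (spec_dag : List (String × List String)) : Decidable (D_resolve_dependencies_py spec_name spec_dag) := by unfold D_resolve_dependencies_py; infer_instance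

def Spec_resolve_dependencies_py (spec_name : String) (spec_dag : List (String × List String)) (out : List String) : Prop := ¬ D_resolve_dependencies_py spec_name spec_dag → out = resolve_dependencies_py_alt spec_name spec_dag
instance (spec_name : String) (spec_dag : List (String × List String)) (out : List String) : Decidable (Spec_resolve_dependencies_py spec_name spec_dag out) := by unfold Spec_resolve_dependencies_py; infer_instance

def pvDiffWitness_resolve_dependencies_py : String × (List (String × List String)) :=
  ("x", [("a", ["p"]), ("", ["x"])])
def pvDiffWitnessOut_resolve_dependencies_py : (List String) × (List String) := ([], ["p"])

-- ===== CLAIM (what is proved, stated in full; the proofs are below) =====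
def Claim_unchanged_resolve_dependencies_py : Prop := ∀ (spec_name : String) (spec_dag : List (String × List String)), Dom_resolve_dependencies_py spec_name spec_dag → Pre_resolve_dependencies_py spec_name spec_dag → Spec_resolve_dependencies_py spec_name spec_dag (resolve_dependencies_py spec_name spec_dag)
def Claim_changed_resolve_dependencies_py : Prop := Dom_resolve_dependencies_py (pvDiffWitness_resolve_dependencies_py.1) (pvDiffWitness_resolve_dependencies_py.2) ∧ Pre_resolve_dependencies_py (pvDiffWitness_resolve_dependencies_py.1) (pvDiffWitness_resolve_dependencies_py.2) ∧ D_resolve_dependencies_py (pvDiffWitness_resolve_dependencies_py.1) (pvDiffWitness_resolve_dependencies_py.2) ∧ resolve_dependencies_py (pvDiffWitness_resolve_dependencies_py.1) (pvDiffWitness_resolve_dependencies_py.2) = pvDiffWitnessOut_resolve_dependencies_py.1 ∧ resolve_dependencies_py_alt (pvDiffWitness_resolve_dependencies_py.1) (pvDiffWitness_resolve_dependencies_py.2) = pvDiffWitnessOut_resolve_dependencies_py.2 ∧ pvDiffWitnessOut_resolve_dependencies_py.1 ≠ pvDiffWitnessOut_resolve_dependencies_py.2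
def Claim_exact_resolve_dependencies_py : Prop := ∀ (spec_name : String) (spec_dag : List (String × List String)), Dom_resolve_dependencies_py spec_name spec_dag → Pre_resolve_dependencies_py spec_name spec_dag → D_resolve_dependencies_py spec_name spec_dag → resolve_dependencies_py spec_name spec_dag ≠ resolve_dependencies_py_alt spec_name spec_dag

-- ===== LEMMAS AND PROOFS =====

-- specs of the layers strictly before the first layer containing s (the common value of both ports)
def pvCollect (s : String) : List (String × List String) → List String
  | [] => []
  | (_, layer_specs) :: rest =>
      if s ∈ layer_specs then [] else layer_specs ++ pvCollect s rest

theorem pvAltLoop_char (s : String) (dag : List (String × List String)) :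
    ∀ acc, pvAltLoop s acc dag =
      if (pvFindLayer s dag).isSome then acc ++ pvCollect s dag else [] := by
  induction dag with
  | nil => intro acc; simp [pvAltLoop, pvFindLayer]
  | cons p rest ih =>
      intro acc
      obtain ⟨ln, specs⟩ := p
      by_cases h : s ∈ specs
      · simp [pvAltLoop, pvFindLayer, pvCollect, h]
      · simp [pvAltLoop, pvFindLayer, pvCollect, h, ih]

theorem pvFind_forward (s : String) (dag : List (String × List String)) (c : String)
    (h : pvFindLayer s dag = some c) :
    ∃ k, ∃ hk : k < dag.length, dag[k].1 = c ∧ s ∈ dag[k].2 ∧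
      (∀ j < k, s ∉ (dag.getD j ("", [])).2) ∧
      pvCollect s dag = (dag.take k).flatMap Prod.snd := by
  induction dag with
  | nil => simp [pvFindLayer] at h
  | cons p rest ih =>
      obtain ⟨ln, specs⟩ := p
      by_cases hm : s ∈ specs
      · refine ⟨0, by simp, ?_, ?_, ?_, ?_⟩ <;>
          simp_all [pvFindLayer, pvCollect]
      · simp only [pvFindLayer, if_neg hm] at h
        obtain ⟨k, hk, h1, h2, h3, h4⟩ := ih h
        refine ⟨k + 1, by simpa using Nat.succ_lt_succ hk, by simpa using h1, by simpa using h2, ?_, ?_⟩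
        · intro j hj
          cases j with
          | zero => simpa using hm
          | succ j => simpa using h3 j (by omega)
        · simp [pvCollect, hm, h4]

theorem pvFind_backward (s : String) :
    ∀ (dag : List (String × List String)) (k : Nat), ∀ hk : k < dag.length,
      (∀ j < k, s ∉ (dag.getD j ("", [])).2) → s ∈ dag[k].2 →
      pvFindLayer s dag = some dag[k].1 ∧
      pvCollect s dag = (dag.take k).flatMap Prod.snd := by
  intro dag
  induction dag with
  | nil => intro k hk; simp at hk
  | cons p rest ih =>
      intro k hk hprev hmem
      obtain ⟨ln, specs⟩ := p
      cases k with
      | zero => simp_all [pvFindLayer, pvCollect]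
      | succ k =>
          have h0 : s ∉ specs := by simpa using hprev 0 (by omega)
          have := ih k (by simpa using Nat.lt_of_succ_lt_succ hk)
            (fun j hj => by simpa using hprev (j+1) (by omega)) (by simpa using hmem)
          simp_all [pvFindLayer, pvCollect]
theorem pvFindLayer_mem_keys (s : String) (dag : List (String × List String)) (c : String)
    (h : pvFindLayer s dag = some c) : c ∈ dag.map Prod.fst := by
  induction dag with
  | nil => simp [pvFindLayer] at h
  | cons p rest ih =>
      obtain ⟨ln, specs⟩ := p
      by_cases hm : s ∈ specs
      · simp [pvFindLayer, hm] at h; simp [h]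
      · simp only [pvFindLayer, if_neg hm] at h
        simp [ih h]

theorem pvA_char (s : String) : ∀ (dag : List (String × List String)),
    (dag.map Prod.fst).Nodup →
    resolve_dependencies_py s dag =
      match pvFindLayer s dag with
      | none => []
      | some c => if c = "" then [] else pvCollect s dag := by
  intro dag
  induction dag with
  | nil => intro _; simp [resolve_dependencies_py, pvFindLayer]
  | cons p rest ih =>
      intro hnd
      obtain ⟨ln, specs⟩ := p
      simp only [List.map_cons, List.nodup_cons] at hnd
      obtain ⟨hln, hndr⟩ := hnd
      by_cases hm : s ∈ specs
      · -- found at head: index 0, empty range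
        have h0 : PySem.List.index? (ln :: rest.map Prod.fst) ln = some 0 :=
          PySem.List.index?_cons_self ln (rest.map Prod.fst)
        have h0' : List.idxOf? ln (ln :: rest.map Prod.fst) = some 0 := by
          simpa using h0
        have hr : PySem.List.pyRange 0 0 1 = [] := rfl
        simp [resolve_dependencies_py, pvFindLayer, hm, pvCollect, h0', hr]
      · simp only [resolve_dependencies_py, pvFindLayer, if_neg hm]
        cases hfind : pvFindLayer s rest with
        | none => simp
        | some c =>
          by_cases hc : c = ""
          · simp [hc]
          · have hcm : c ∈ rest.map Prod.fst := pvFindLayer_mem_keys s rest c hfind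
            have hne : ln ≠ c := fun h => hln (h ▸ hcm)
            obtain ⟨k, hk⟩ : ∃ k, PySem.List.index? (rest.map Prod.fst) c = some k := by
              have := (PySem.List.index?_isSome_iff (rest.map Prod.fst) c).mpr hcm
              exact Option.isSome_iff_exists.mp this
            have hklt : k < (rest.map Prod.fst).length := by
              obtain ⟨pre, suf, hsplit, hlen, -⟩ :=
                (PySem.List.index?_eq_some_iff _ _ _).mp hk
              simp [hsplit, ← hlen]
            have hidx : PySem.List.index? (ln :: rest.map Prod.fst) c = some (k + 1) := by
              have h' := PySem.List.index?_cons_of_ne (x := ln) (v := c) (rest.map Prod.fst) hne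
              rw [hk] at h'
              simpa using h'
            simp only [if_neg hc, List.map_cons, hidx, Option.getD_some]
            -- rewrite the foldl as a flatMap over the range
            rw [PySem.List.foldl_append_eq_flatMap]
            rw [show ((k + 1 : Nat) : Int) = ((k : Int) + 1) by push_cast; ring]
            rw [PySem.List.pyRange_one_cons (by omega)]
            simp only [List.flatMap_cons, List.nil_append]
            have hhead : (PySem.Dict.mk ((ln, specs) :: rest)).getD
                (PySem.List.pyGetD (ln :: rest.map Prod.fst) 0 "") [] = specs := by
              rw [PySem.List.pyGetD_zero_cons]
              rw [PySem.Dict.getD_eq_get?_getD, PySem.Dict.get?_mk_cons]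
              simp
            rw [hhead]
            have hcol : pvCollect s ((ln, specs) :: rest) = specs ++ pvCollect s rest := by
              simp [pvCollect, hm]
            rw [hcol]
            congr 1
            -- tail range: shift by one into rest
            rw [show ((0:Int) + 1) = 1 by ring]
            rw [PySem.List.pyRange_one 1 ((k:Int)+1)]
            rw [show (((k:Int) + 1) - 1).toNat = k by omega]
            have htail : ∀ j ∈ List.range k,
                (PySem.Dict.mk ((ln, specs) :: rest)).getD
                  (PySem.List.pyGetD (ln :: rest.map Prod.fst) (1 + (j:Int)) "") [] =
                (PySem.Dict.mk rest).getD
                  (PySem.List.pyGetD (rest.map Prod.fst) (j:Int) "") [] := by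
              intro j hj
              have hjk : j < k := List.mem_range.mp hj
              have hjlen : j < (rest.map Prod.fst).length := by omega
              have h1 : PySem.List.pyGetD (ln :: rest.map Prod.fst) (1 + (j:Int)) "" =
                  (rest.map Prod.fst)[j] := by
                rw [show (1 + (j:Int)) = ((j+1 : Nat) : Int) by push_cast; ring]
                rw [PySem.List.pyGetD_natCast]
                simp [List.getD_eq_getElem?_getD, List.getElem?_cons_succ,
                  List.getElem?_eq_getElem hjlen]
              have h2 : PySem.List.pyGetD (rest.map Prod.fst) (j:Int) "" =
                  (rest.map Prod.fst)[j] := by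
                rw [PySem.List.pyGetD_natCast]
                simp [List.getD_eq_getElem?_getD, List.getElem?_eq_getElem hjlen]
              rw [h1, h2]
              have hjr : j < rest.length := by simpa using hjlen
              have hkey : rest[j].1 ≠ ln := fun hkeq =>
                hln (hkeq ▸ (List.mem_map_of_mem (List.getElem_mem hjr)))
              simp [PySem.Dict.getD_eq_get?_getD, PySem.Dict.get?_mk_cons, Ne.symm hkey]
            rw [List.flatMap_map]
            refine Eq.trans (List.flatMap_congr htail) ?_
            have hih := ih hndr
            simp only [resolve_dependencies_py, hfind, if_neg hc, hk, Option.getD_some] at hih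
            rw [PySem.List.foldl_append_eq_flatMap, List.nil_append,
              PySem.List.pyRange_one 0 (k:Int)] at hih
            rw [show ((k:Int) - 0).toNat = k by omega] at hih
            rw [List.flatMap_map] at hih
            simp only [Int.zero_add] at hih
            exact hih

-- ===== VERDICT (by name: the statement is the Claim_ definition above) =====
theorem resolve_dependencies_py_spec : Claim_unchanged_resolve_dependencies_py := by
  intro s dag _ hpre hnD
  rw [pvA_char s dag hpre]
  show _ = pvAltLoop s [] dag
  rw [pvAltLoop_char]
  cases hfind : pvFindLayer s dag with
  | none => simp
  | some c =>
    simp only [Option.isSome_some, if_true, List.nil_append]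
    by_cases hc : c = ""
    · subst hc
      obtain ⟨k, hk, h1, h2, h3, h4⟩ := pvFind_forward s dag "" hfind
      have hgd : dag.getD k ("", []) = dag[k] := by
        simp [List.getD_eq_getElem?_getD, List.getElem?_eq_getElem hk]
      have hnil : (dag.take k).flatMap Prod.snd = [] := by
        by_contra hne
        exact hnD ⟨k, hk, by rw [hgd]; exact h1, by rw [hgd]; exact h2, h3, hne⟩
      simp [h4, hnil]
    · simp [hc]

theorem resolve_dependencies_py_changed : Claim_changed_resolve_dependencies_py := by
  unfold Claim_changed_resolve_dependencies_py; decide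

theorem resolve_dependencies_py_tight : Claim_exact_resolve_dependencies_py := by
  intro s dag _ hpre hD
  obtain ⟨k, hk, h1, h2, h3, h4⟩ := hD
  have hgd : dag.getD k ("", []) = dag[k] := by
    simp [List.getD_eq_getElem?_getD, List.getElem?_eq_getElem hk]
  obtain ⟨hfind, hcol⟩ := pvFind_backward s dag k hk h3 (by rw [hgd] at h2; exact h2)
  have hname : dag[k].1 = "" := by rw [← hgd]; exact h1
  have hA : resolve_dependencies_py s dag = [] := by
    rw [pvA_char s dag hpre, hfind, hname]
    simp
  have hB : resolve_dependencies_py_alt s dag = (dag.take k).flatMap Prod.snd := by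
    show pvAltLoop s [] dag = _
    rw [pvAltLoop_char, hfind]
    simpa using hcol
  rw [hA, hB]
  exact fun h => h4 h.symm
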